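-- pv_equiv track=rewrite | github.com/nezinomas/keeping | project/bookkeeping/lib/views_helpers.py | sum_detailed
-- ===== SOURCE A (Python) =====
-- from collections import Counter, defaultdict
--
-- def sum_detailed(dataset, group_by_key, sum_value_keys):
--     container = defaultdict(Counter)
--
--     for item in dataset:
--         key = item[group_by_key]
--         values = {k: item[k] for k in sum_value_keys}
--         container[key].update(values)
--
--     new_dataset = []
--     for item in container.items():
--         new_dataset.append({group_by_key: item[0], **item[1]})
--
--     new_dataset.sort(key=lambda item: item[group_by_key])
--
--     return new_dataset
-- ===== SOURCE B (Python) =====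
-- from itertools import groupby
--
--
-- def sum_detailed(dataset, group_by_key, sum_value_keys):
--     key_of = lambda item: item[group_by_key]
--     result = []
--     for key, grp in groupby(sorted(dataset, key=key_of), key=key_of):
--         sums = dict.fromkeys(sum_value_keys, 0)
--         for row in grp:
--             for k in sums:
--                 sums[k] += row[k]
--         result.append({group_by_key: key, **sums})
--     return result
-- ===== Notes on version B (the rewrite author's own statement) =====
-- stated objective: alternative
-- what changed: Replaces the defaultdict(Counter) hash-grouping followed by a final sort with a sort-first decomposition: sort the dataset once by the group key, then sweep it with itertools.groupby, accumulating a zero-initialized sums dict per consecutive run and emitting groups already in key order.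
import Mathlib
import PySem

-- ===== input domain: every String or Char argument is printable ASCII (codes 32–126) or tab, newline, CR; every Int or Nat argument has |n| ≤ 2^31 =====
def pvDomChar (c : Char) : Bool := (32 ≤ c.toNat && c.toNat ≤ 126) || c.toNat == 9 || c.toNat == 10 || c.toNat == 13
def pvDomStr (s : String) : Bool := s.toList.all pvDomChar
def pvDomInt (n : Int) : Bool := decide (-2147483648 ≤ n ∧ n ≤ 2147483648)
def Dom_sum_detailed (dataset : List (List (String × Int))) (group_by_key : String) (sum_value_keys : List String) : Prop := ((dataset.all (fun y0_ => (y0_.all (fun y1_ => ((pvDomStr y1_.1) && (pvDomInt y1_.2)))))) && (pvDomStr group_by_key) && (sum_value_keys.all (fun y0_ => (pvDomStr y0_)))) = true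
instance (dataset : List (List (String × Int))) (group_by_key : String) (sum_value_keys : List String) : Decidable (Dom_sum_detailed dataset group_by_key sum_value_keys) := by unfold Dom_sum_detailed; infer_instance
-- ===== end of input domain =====

-- B replaces A's defaultdict(Counter) hash-grouping + final sort by a sort-first sweep with
-- consecutive-run grouping (itertools.groupby style); same cost class, different decomposition.


-- ===== PORT A =====
-- item[k] on a row dict (first match). Python raises KeyError when the key is absent; Pre_ requires
-- presence, so the `getD 0` default is never reached on admitted inputs.
def pvRowGet (item : List (String × Int)) (k : String) : Int :=
  ((PySem.Dict.mk item).get? k).getD 0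

def sum_detailed (dataset : List (List (String × Int))) (group_by_key : String) (sum_value_keys : List String) : List (List (String × Int)) :=
  let container : PySem.Dict Int (PySem.Dict String Int) :=
    dataset.foldl (fun cont item =>
      let key := pvRowGet item group_by_key
      let values : PySem.Dict String Int :=
        sum_value_keys.foldl (fun d k => d.insert k (pvRowGet item k)) PySem.Dict.empty
      cont.insert key
        (values.items.foldl (fun c p => c.insert p.1 (c.getD p.1 0 + p.2))
          (cont.getD key PySem.Dict.empty))) PySem.Dict.empty
  let new_dataset : List (List (String × Int)) :=
    container.items.foldl (fun acc it =>
      acc ++ [(it.2.items.foldl (fun d p => d.insert p.1 p.2)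
                (PySem.Dict.empty.insert group_by_key it.1)).items]) []
  PySem.List.sorted new_dataset (fun row => pvRowGet row group_by_key) false

-- ===== PORT B =====
-- consecutive-run grouping of an already sorted row list (itertools.groupby in Source B)
def pvGroupsB (group_by_key : String) (sum_value_keys : List String) : List (List (String × Int)) → List (List (String × Int))
  | [] => []
  | r :: rest =>
    let key := pvRowGet r group_by_key
    let grp := r :: rest.takeWhile (fun x => pvRowGet x group_by_key == key)
    let rest' := rest.dropWhile (fun x => pvRowGet x group_by_key == key)
    let sums0 : PySem.Dict String Int :=
      sum_value_keys.foldl (fun d k => d.insert k 0) PySem.Dict.empty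
    let sums := grp.foldl (fun s row =>
      s.keys.foldl (fun s' k => s'.insert k (s'.getD k 0 + pvRowGet row k)) s) sums0
    (sums.items.foldl (fun d p => d.insert p.1 p.2)
      (PySem.Dict.empty.insert group_by_key key)).items :: pvGroupsB group_by_key sum_value_keys rest'
  termination_by rows => rows.length
  decreasing_by simp only [List.length_cons]; exact Nat.lt_succ_of_le (List.length_dropWhile_le _ _)

def sum_detailed_alt (dataset : List (List (String × Int))) (group_by_key : String) (sum_value_keys : List String) : List (List (String × Int)) :=
  pvGroupsB group_by_key sum_value_keys
    (PySem.List.sorted dataset (fun item => pvRowGet item group_by_key) false)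

-- ===== PRECONDITION & SPEC =====
-- Pre_ excludes (a) inputs where some row lacks group_by_key or a sum key — there Python A raises
-- KeyError — and (b) calls with group_by_key itself among sum_value_keys, a corner where the `**`
-- merge overwrites the group label with its own sum and A's output order (sorted by that sum, ties
-- by first appearance) is an accident of the implementation as defensible as B's key order.
def Pre_sum_detailed (dataset : List (List (String × Int))) (group_by_key : String) (sum_value_keys : List String) : Prop :=
  (∀ item ∈ dataset, (PySem.Dict.mk item).contains group_by_key = true ∧
      ∀ k ∈ sum_value_keys, (PySem.Dict.mk item).contains k = true) ∧
  group_by_key ∉ sum_value_keys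

instance (dataset : List (List (String × Int))) (group_by_key : String) (sum_value_keys : List String) : Decidable (Pre_sum_detailed dataset group_by_key sum_value_keys) := by unfold Pre_sum_detailed; infer_instance

def pvWitness_sum_detailed : (List (List (String × Int))) × String × List String :=
  ([[("a", 1), ("b", 2)], [("a", 1), ("b", 3)], [("a", 2), ("b", 5)]], "a", ["b"])

def Spec_sum_detailed (dataset : List (List (String × Int))) (group_by_key : String) (sum_value_keys : List String) (out : List (List (String × Int))) : Prop := out = sum_detailed_alt dataset group_by_key sum_value_keys
instance (dataset : List (List (String × Int))) (group_by_key : String) (sum_value_keys : List String) (out : List (List (String × Int))) : Decidable (Spec_sum_detailed dataset group_by_key sum_value_keys out) := by unfold Spec_sum_detailed; infer_instance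

-- ===== CLAIM (what is proved, stated in full; the proofs are below) =====
def Claim_equal_sum_detailed : Prop := ∀ (dataset : List (List (String × Int))) (group_by_key : String) (sum_value_keys : List String), Dom_sum_detailed dataset group_by_key sum_value_keys → Pre_sum_detailed dataset group_by_key sum_value_keys → Spec_sum_detailed dataset group_by_key sum_value_keys (sum_detailed dataset group_by_key sum_value_keys)

-- ===== LEMMAS AND PROOFS =====

-- proof-only abbreviations
def pvAddRow (K : List String) (f : String → Int) (c : PySem.Dict String Int) : PySem.Dict String Int :=
  K.foldl (fun c k => c.insert k (c.getD k 0 + f k)) c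

def pvGrpSum (K : List String) (L : List (List (String × Int))) (c : PySem.Dict String Int) : PySem.Dict String Int :=
  L.foldl (fun c item => pvAddRow K (pvRowGet item) c) c

-- the canonical output row for group key κ, with sums taken over ds
def pvFrow (g : String) (K : List String) (ds : List (List (String × Int))) (κ : Int) : List (String × Int) :=
  (g, κ) :: K.map (fun k => (k, ((ds.filter (fun r => pvRowGet r g == κ)).map (fun r => pvRowGet r k)).sum))

-- the run keys of a row list, in run order
def pvRunKeys (g : String) : List (List (String × Int)) → List Int
  | [] => []
  | r :: rest => pvRowGet r g :: pvRunKeys g (rest.dropWhile (fun x => pvRowGet x g == pvRowGet r g))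
  termination_by rows => rows.length
  decreasing_by simp only [List.length_cons]; exact Nat.lt_succ_of_le (List.length_dropWhile_le _ _)

theorem pv_foldl_append_singleton {α β : Type} (l : List α) (h : α → β) (a0 : List β) :
    l.foldl (fun a x => a ++ [h x]) a0 = a0 ++ l.map h := by
  induction l generalizing a0 with
  | nil => simp
  | cons x t ih => simp [ih]

theorem pv_getD_foldl_insert (ks : List String) (f : String → Int) (d : PySem.Dict String Int) (k' : String) :
    (ks.foldl (fun d k => d.insert k (f k)) d).getD k' 0 = if k' ∈ ks then f k' else d.getD k' 0 := by
  induction ks generalizing d with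
  | nil => simp
  | cons k t ih =>
    simp only [List.foldl_cons, ih, PySem.Dict.getD_insert, List.mem_cons]
    by_cases h1 : k' ∈ t <;> by_cases h2 : k' = k <;> simp [h1, h2]

theorem pv_keys_foldl_insert_fun (ks : List String) (f : String → Int) :
    (ks.foldl (fun d k => d.insert k (f k)) PySem.Dict.empty).keys = PySem.Set.ofList ks := by
  have h := PySem.Dict.keys_foldl_insert (l := ks) (f := fun _ k => f k) (d := PySem.Dict.empty)
  simpa using h

theorem pv_items_foldl_insert_fun (ks : List String) (f : String → Int) :
    (ks.foldl (fun d k => d.insert k (f k)) PySem.Dict.empty).items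
      = (PySem.Set.ofList ks).map (fun k => (k, f k)) := by
  have hk := pv_keys_foldl_insert_fun ks f
  have hnd : (ks.foldl (fun d k => d.insert k (f k)) PySem.Dict.empty).keys.Nodup := by
    rw [hk]; exact PySem.Set.nodup_ofList ks
  rw [PySem.Dict.items_eq_map_keys _ hnd 0, hk]
  apply List.map_congr_left
  intro k hkmem
  rw [pv_getD_foldl_insert]
  simp [(PySem.Set.mem_ofList ks k).1 hkmem]

theorem pv_addRow_eq (ks : List String) (item : List (String × Int)) (c : PySem.Dict String Int) :
    ((ks.foldl (fun d k => d.insert k (pvRowGet item k)) PySem.Dict.empty).items.foldl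
        (fun c p => c.insert p.1 (c.getD p.1 0 + p.2)) c)
      = pvAddRow (PySem.Set.ofList ks) (pvRowGet item) c := by
  rw [pv_items_foldl_insert_fun, List.foldl_map]
  rfl

theorem pv_getD_addRow (K : List String) (hK : K.Nodup) (f : String → Int) (c : PySem.Dict String Int) (k' : String) :
    (pvAddRow K f c).getD k' 0 = c.getD k' 0 + if k' ∈ K then f k' else 0 := by
  induction K generalizing c with
  | nil => simp [pvAddRow]
  | cons k t ih =>
    simp only [List.nodup_cons] at hK
    simp only [pvAddRow, List.foldl_cons] at ih ⊢
    rw [ih hK.2, PySem.Dict.getD_insert]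
    by_cases h2 : k' = k
    · subst h2
      have hnt : k' ∉ t := hK.1
      simp [hnt]
    · simp only [if_neg h2, List.mem_cons]
      by_cases h1 : k' ∈ t <;> simp [h1, h2]

theorem pv_set_update_self (s : PySem.Set String) (K : List String) (h : ∀ k ∈ K, k ∈ s) :
    PySem.Set.update s K = s := by
  rw [PySem.Set.update_eq_append_filter]
  have hnil : (PySem.Set.ofList K).filter (fun y => !PySem.Set.contains s y) = [] := by
    rw [List.filter_eq_nil_iff]
    intro y hy
    have hmem : y ∈ s := h y ((PySem.Set.mem_ofList K y).1 hy)
    simp only [Bool.not_eq_true', Bool.not_eq_false]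
    exact (PySem.Set.contains_iff s y).2 hmem
  rw [hnil]
  simp

theorem pv_keys_addRow_self (K : List String) (f : String → Int) (c : PySem.Dict String Int) (h : c.keys = K) :
    (pvAddRow K f c).keys = K := by
  have hk := PySem.Dict.keys_foldl_insert (l := K) (f := fun d k => d.getD k 0 + f k) (d := c)
  simp only [pvAddRow]
  rw [hk, h, pv_set_update_self K K (fun k hk => hk)]

theorem pv_getD_grpSum (K : List String) (hK : K.Nodup) (L : List (List (String × Int))) (c : PySem.Dict String Int) (k' : String) :
    (pvGrpSum K L c).getD k' 0 = c.getD k' 0 + if k' ∈ K then (L.map (fun r => pvRowGet r k')).sum else 0 := by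
  induction L generalizing c with
  | nil => simp [pvGrpSum]
  | cons item t ih =>
    simp only [pvGrpSum, List.foldl_cons] at ih ⊢
    rw [ih, pv_getD_addRow K hK]
    by_cases h : k' ∈ K
    · simp [h]; omega
    · simp [h]

theorem pv_keys_grpSum_self (K : List String) (L : List (List (String × Int))) (c : PySem.Dict String Int) (h : c.keys = K) :
    (pvGrpSum K L c).keys = K := by
  induction L generalizing c with
  | nil => simpa [pvGrpSum]
  | cons item t ih =>
    simp only [pvGrpSum, List.foldl_cons] at ih ⊢
    exact ih _ (pv_keys_addRow_self K _ c h)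

theorem pv_keys_addRow_empty (ks : List String) (f : String → Int) :
    (pvAddRow (PySem.Set.ofList ks) f PySem.Dict.empty).keys = PySem.Set.ofList ks := by
  have hk := PySem.Dict.keys_foldl_insert (l := PySem.Set.ofList ks)
    (f := fun (d : PySem.Dict String Int) k => d.getD k 0 + f k) (d := PySem.Dict.empty)
  simp only [pvAddRow]
  rw [hk, PySem.Dict.keys_empty, PySem.Set.update_nil_left, PySem.Set.ofList_ofList]

theorem pv_grp_items_of_keys (ks : List String) (L : List (List (String × Int)))
    (c : PySem.Dict String Int) (hkeys : (pvGrpSum (PySem.Set.ofList ks) L c).keys = PySem.Set.ofList ks)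
    (hz : ∀ k, c.getD k 0 = 0) :
    (pvGrpSum (PySem.Set.ofList ks) L c).items
      = (PySem.Set.ofList ks).map (fun k => (k, (L.map (fun r => pvRowGet r k)).sum)) := by
  have hnd : (pvGrpSum (PySem.Set.ofList ks) L c).keys.Nodup := by
    rw [hkeys]; exact PySem.Set.nodup_ofList ks
  rw [PySem.Dict.items_eq_map_keys _ hnd 0, hkeys]
  apply List.map_congr_left
  intro k hk
  rw [pv_getD_grpSum _ (PySem.Set.nodup_ofList ks), hz, if_pos hk]
  simp

theorem pv_keys_grp_empty (ks : List String) (L : List (List (String × Int))) (hL : L ≠ []) :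
    (pvGrpSum (PySem.Set.ofList ks) L PySem.Dict.empty).keys = PySem.Set.ofList ks := by
  obtain ⟨item, t, rfl⟩ : ∃ i t, L = i :: t := by
    cases L with
    | nil => exact absurd rfl hL
    | cons i t => exact ⟨i, t, rfl⟩
  show (pvGrpSum _ t (pvAddRow _ (pvRowGet item) PySem.Dict.empty)).keys = _
  exact pv_keys_grpSum_self _ t _ (pv_keys_addRow_empty ks _)

theorem pv_grp_items_of_ne_nil (ks : List String) (L : List (List (String × Int))) (hL : L ≠ []) :
    (pvGrpSum (PySem.Set.ofList ks) L PySem.Dict.empty).items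
      = (PySem.Set.ofList ks).map (fun k => (k, (L.map (fun r => pvRowGet r k)).sum)) := by
  apply pv_grp_items_of_keys
  · exact pv_keys_grp_empty ks L hL
  · intro k
    simp

theorem pv_grpB_items (ks : List String) (L : List (List (String × Int))) :
    (pvGrpSum (PySem.Set.ofList ks) L (ks.foldl (fun d k => d.insert k 0) PySem.Dict.empty)).items
      = (PySem.Set.ofList ks).map (fun k => (k, (L.map (fun r => pvRowGet r k)).sum)) := by
  have hk0 : (ks.foldl (fun d k => d.insert k (0:Int)) PySem.Dict.empty).keys = PySem.Set.ofList ks :=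
    pv_keys_foldl_insert_fun ks (fun _ => 0)
  apply pv_grp_items_of_keys
  · exact pv_keys_grpSum_self _ L _ hk0
  · intro k
    rw [pv_getD_foldl_insert ks (fun _ => 0)]
    simp

theorem pv_merge_items (g : String) (ks : List String) (hg : g ∉ ks) (κ : Int) (c : PySem.Dict String Int)
    (hkeys : c.keys = PySem.Set.ofList ks) :
    (c.items.foldl (fun d p => d.insert p.1 p.2) (PySem.Dict.empty.insert g κ)).items
      = (g, κ) :: c.items := by
  have h1 : ∀ a ∈ c.items, (PySem.Dict.empty.insert g κ).contains a.1 = false := by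
    intro a ha
    have hk : a.1 ∈ c.keys := List.mem_map_of_mem ha
    rw [hkeys] at hk
    have hks : a.1 ∈ ks := (PySem.Set.mem_ofList ks a.1).1 hk
    have hne : a.1 ≠ g := fun e => hg (e ▸ hks)
    rw [PySem.Dict.contains_insert]
    simp [hne, PySem.Dict.contains_empty]
  have h2 : (c.items.map Prod.fst).Nodup := by
    show c.keys.Nodup
    rw [hkeys]; exact PySem.Set.nodup_ofList ks
  have h := PySem.Dict.items_foldl_insert_fresh c.items Prod.fst Prod.snd
    (PySem.Dict.empty.insert g κ) h1 h2
  rw [show (c.items.foldl (fun d p => d.insert p.1 p.2) (PySem.Dict.empty.insert g κ))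
        = (c.items.foldl (fun d a => d.insert (Prod.fst a) (Prod.snd a)) (PySem.Dict.empty.insert g κ)) from rfl,
      h, PySem.Dict.items_insert_of_not_contains _ _ (PySem.Dict.contains_empty g)]
  rw [show (PySem.Dict.empty : PySem.Dict String Int).items = [] from rfl]
  simp

theorem pv_rowGet_cons (g : String) (κ : Int) (t : List (String × Int)) :
    pvRowGet ((g, κ) :: t) g = κ := by
  simp [pvRowGet, PySem.Dict.get?_mk_cons]

theorem pv_foldA_getD (g : String) (ks : List String) (ds : List (List (String × Int)))
    (cont : PySem.Dict Int (PySem.Dict String Int)) (κ : Int) :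
    (ds.foldl (fun cont item =>
        cont.insert (pvRowGet item g)
          (pvAddRow (PySem.Set.ofList ks) (pvRowGet item) (cont.getD (pvRowGet item g) PySem.Dict.empty))) cont).getD κ PySem.Dict.empty
      = pvGrpSum (PySem.Set.ofList ks) (ds.filter (fun r => pvRowGet r g == κ)) (cont.getD κ PySem.Dict.empty) := by
  induction ds generalizing cont with
  | nil => simp [pvGrpSum]
  | cons item t ih =>
    simp only [List.foldl_cons, List.filter_cons]
    rw [ih, PySem.Dict.getD_insert]
    by_cases h : κ = pvRowGet item g
    · subst h
      simp only [beq_self_eq_true]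
      simp [pvGrpSum]
    · have hb : (pvRowGet item g == κ) = false := by
        simp [Ne.symm h]
      simp [h, hb]

theorem pv_A_eq (dataset : List (List (String × Int))) (g : String) (ks : List String) (hg : g ∉ ks) :
    sum_detailed dataset g ks
      = PySem.List.sorted
          ((PySem.Set.ofList (dataset.map (fun r => pvRowGet r g))).map
            (pvFrow g (PySem.Set.ofList ks) dataset))
          (fun row => pvRowGet row g) false := by
  have hkeysC : (dataset.foldl (fun cont item =>
        cont.insert (pvRowGet item g)
          (pvAddRow (PySem.Set.ofList ks) (pvRowGet item)
            (cont.getD (pvRowGet item g) PySem.Dict.empty))) PySem.Dict.empty).keys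
      = PySem.Set.ofList (dataset.map (fun r => pvRowGet r g)) := by
    have h := PySem.Dict.keys_foldl_insert_key (l := dataset)
      (key := fun item => pvRowGet item g)
      (f := fun cont item => pvAddRow (PySem.Set.ofList ks) (pvRowGet item)
        (cont.getD (pvRowGet item g) PySem.Dict.empty))
      (d := PySem.Dict.empty)
    rw [h, PySem.Dict.keys_empty, PySem.Set.update_nil_left]
  unfold sum_detailed
  simp only [pv_addRow_eq]
  rw [PySem.Dict.items_eq_map_keys _ (by rw [hkeysC]; exact PySem.Set.nodup_ofList _) PySem.Dict.empty]
  rw [hkeysC, pv_foldl_append_singleton, List.nil_append, List.map_map]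
  congr 1
  apply List.map_congr_left
  intro κ hκ
  have hne : dataset.filter (fun r => pvRowGet r g == κ) ≠ [] := by
    rcases List.mem_map.1 ((PySem.Set.mem_ofList _ κ).1 hκ) with ⟨r, hr, rfl⟩
    exact List.ne_nil_of_mem (List.mem_filter.2 ⟨hr, by simp⟩)
  simp only [Function.comp_apply]
  rw [pv_foldA_getD g ks dataset PySem.Dict.empty κ, PySem.Dict.getD_empty,
      pv_merge_items g ks hg κ _ (pv_keys_grp_empty ks _ hne),
      pv_grp_items_of_ne_nil ks _ hne]
  rfl

theorem pv_dropWhile_gt (g : String) (κ : Int) (l : List (List (String × Int)))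
    (hp : l.Pairwise (fun a b => pvRowGet a g ≤ pvRowGet b g))
    (hall : ∀ x ∈ l, κ ≤ pvRowGet x g) :
    ∀ x ∈ l.dropWhile (fun z => pvRowGet z g == κ), κ < pvRowGet x g := by
  induction l with
  | nil => simp
  | cons a t ih =>
    rw [List.dropWhile_cons]
    rcases List.pairwise_cons.1 hp with ⟨hhd, htl⟩
    by_cases hpa : (pvRowGet a g == κ) = true
    · rw [if_pos hpa]
      exact ih htl (fun x hx => hall x (List.mem_cons_of_mem a hx))
    · rw [if_neg hpa]
      intro x hx
      rcases List.mem_cons.1 hx with rfl | hx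
      · have h1 : κ ≤ pvRowGet x g := hall x (List.mem_cons_self)
        have h2 : pvRowGet x g ≠ κ := by simpa using hpa
        omega
      · have h1 : κ ≤ pvRowGet a g := hall a (List.mem_cons_self)
        have h2 : pvRowGet a g ≠ κ := by simpa using hpa
        have h3 : pvRowGet a g ≤ pvRowGet x g := hhd x hx
        omega

theorem pv_runKeys_mem (g : String) (κ : Int) : ∀ (n : Nat) (rows : List (List (String × Int))), rows.length ≤ n →
    (κ ∈ pvRunKeys g rows ↔ κ ∈ rows.map (fun r => pvRowGet r g)) := by
  intro n
  induction n with
  | zero =>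
    intro rows hlen
    rw [List.length_eq_zero_iff.1 (Nat.le_zero.1 hlen)]
    simp [pvRunKeys]
  | succ n ih =>
    intro rows hlen
    cases rows with
    | nil => simp [pvRunKeys]
    | cons r rest =>
      rw [pvRunKeys]
      have hlen' : (rest.dropWhile (fun x => pvRowGet x g == pvRowGet r g)).length ≤ n := by
        have := List.length_dropWhile_le (fun x => pvRowGet x g == pvRowGet r g) rest
        simp only [List.length_cons] at hlen
        omega
      constructor
      · intro h
        rcases List.mem_cons.1 h with rfl | h
        · simp
        · have := (ih _ hlen').1 h
          rcases List.mem_map.1 this with ⟨x, hx, rfl⟩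
          exact List.mem_map.2 ⟨x, List.mem_cons_of_mem r ((List.dropWhile_sublist _).mem hx), rfl⟩
      · intro h
        rcases List.mem_map.1 h with ⟨x, hx, rfl⟩
        rcases List.mem_cons.1 hx with rfl | hx
        · exact List.mem_cons_self
        · have hsplit := List.takeWhile_append_dropWhile
            (p := fun x => pvRowGet x g == pvRowGet r g) (l := rest)
          rw [← hsplit] at hx
          rcases List.mem_append.1 hx with hx | hx
          · have := List.mem_takeWhile_imp hx
            simp only [beq_iff_eq] at this
            rw [this]
            exact List.mem_cons_self
          · exact List.mem_cons_of_mem _ ((ih _ hlen').2 (List.mem_map.2 ⟨x, hx, rfl⟩))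

theorem pv_runKeys_pairwise (g : String) : ∀ (n : Nat) (rows : List (List (String × Int))), rows.length ≤ n →
    rows.Pairwise (fun a b => pvRowGet a g ≤ pvRowGet b g) →
    (pvRunKeys g rows).Pairwise (· < ·) := by
  intro n
  induction n with
  | zero =>
    intro rows hlen hp
    rw [List.length_eq_zero_iff.1 (Nat.le_zero.1 hlen)]
    simp [pvRunKeys]
  | succ n ih =>
    intro rows hlen hp
    cases rows with
    | nil => simp [pvRunKeys]
    | cons r rest =>
      rw [pvRunKeys]
      rcases List.pairwise_cons.1 hp with ⟨hhd, htl⟩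
      have hlen' : (rest.dropWhile (fun x => pvRowGet x g == pvRowGet r g)).length ≤ n := by
        have := List.length_dropWhile_le (fun x => pvRowGet x g == pvRowGet r g) rest
        simp only [List.length_cons] at hlen
        omega
      have hdrop : (rest.dropWhile (fun x => pvRowGet x g == pvRowGet r g)).Pairwise
          (fun a b => pvRowGet a g ≤ pvRowGet b g) :=
        List.Pairwise.sublist (List.dropWhile_sublist _) htl
      refine List.pairwise_cons.2 ⟨?_, ih _ hlen' hdrop⟩
      intro κ' hκ'
      have hmem := (pv_runKeys_mem g κ' n _ hlen').1 hκ'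
      rcases List.mem_map.1 hmem with ⟨x, hx, rfl⟩
      exact pv_dropWhile_gt g (pvRowGet r g) rest htl (fun y hy => hhd y hy) x hx

theorem pv_grpB_fold (ks : List String) (L : List (List (String × Int))) (s : PySem.Dict String Int)
    (h : s.keys = PySem.Set.ofList ks) :
    L.foldl (fun s row => s.keys.foldl (fun s' k => s'.insert k (s'.getD k 0 + pvRowGet row k)) s) s
      = pvGrpSum (PySem.Set.ofList ks) L s := by
  induction L generalizing s with
  | nil => simp [pvGrpSum]
  | cons row t ih =>
    simp only [List.foldl_cons, pvGrpSum] at ih ⊢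
    rw [h]
    rw [show (PySem.Set.ofList ks).foldl (fun s' k => s'.insert k (s'.getD k 0 + pvRowGet row k)) s
          = pvAddRow (PySem.Set.ofList ks) (pvRowGet row) s from rfl]
    exact ih _ (pv_keys_addRow_self _ _ _ h)

theorem pv_groupsB_eq (g : String) (ks : List String) (hg : g ∉ ks) :
    ∀ (n : Nat) (rows : List (List (String × Int))), rows.length ≤ n →
    rows.Pairwise (fun a b => pvRowGet a g ≤ pvRowGet b g) →
    pvGroupsB g ks rows = (pvRunKeys g rows).map (pvFrow g (PySem.Set.ofList ks) rows) := by
  intro n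
  induction n with
  | zero =>
    intro rows hlen hp
    rw [List.length_eq_zero_iff.1 (Nat.le_zero.1 hlen)]
    simp [pvGroupsB, pvRunKeys]
  | succ n ih =>
    intro rows hlen hp
    cases rows with
    | nil => simp [pvGroupsB, pvRunKeys]
    | cons r rest =>
      rw [pvGroupsB, pvRunKeys]
      rcases List.pairwise_cons.1 hp with ⟨hhd, htl⟩
      have hlen' : (rest.dropWhile (fun x => pvRowGet x g == pvRowGet r g)).length ≤ n := by
        have := List.length_dropWhile_le (fun x => pvRowGet x g == pvRowGet r g) rest
        simp only [List.length_cons] at hlen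
        omega
      have hdrop : (rest.dropWhile (fun x => pvRowGet x g == pvRowGet r g)).Pairwise
          (fun a b => pvRowGet a g ≤ pvRowGet b g) :=
        List.Pairwise.sublist (List.dropWhile_sublist _) htl
      have hdW_gt : ∀ x ∈ rest.dropWhile (fun x => pvRowGet x g == pvRowGet r g),
          pvRowGet r g < pvRowGet x g :=
        pv_dropWhile_gt g (pvRowGet r g) rest htl (fun y hy => hhd y hy)
      have hk0 : (ks.foldl (fun d k => d.insert k (0:Int)) PySem.Dict.empty).keys
          = PySem.Set.ofList ks := pv_keys_foldl_insert_fun ks (fun _ => 0)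
      have hgrp : r :: rest.takeWhile (fun x => pvRowGet x g == pvRowGet r g)
          = (r :: rest).filter (fun x => pvRowGet x g == pvRowGet r g) := by
        rw [List.filter_cons, if_pos (by simp)]
        congr 1
        conv_rhs => rw [← List.takeWhile_append_dropWhile
          (p := fun x => pvRowGet x g == pvRowGet r g) (l := rest)]
        rw [List.filter_append,
            List.filter_eq_self.2 (fun a ha => List.mem_takeWhile_imp
              (p := fun x => pvRowGet x g == pvRowGet r g) ha),
            List.filter_eq_nil_iff.2 ?_, List.append_nil]
        intro x hx
        have := hdW_gt x hx
        simp
        omega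
      rw [pv_grpB_fold ks _ _ hk0,
          pv_merge_items g ks hg _ _ (pv_keys_grpSum_self _ _ _ hk0),
          pv_grpB_items,
          ih _ hlen' hdrop,
          List.map_cons]
      congr 1
      · simp only [pvFrow]
        rw [hgrp]
      · apply List.map_congr_left
        intro kp hkp
        have hmem := (pv_runKeys_mem g kp n _ hlen').1 hkp
        rcases List.mem_map.1 hmem with ⟨x, hx, rfl⟩
        have hlt := hdW_gt x hx
        have hfil : (r :: rest).filter (fun z => pvRowGet z g == pvRowGet x g)
            = (rest.dropWhile (fun z => pvRowGet z g == pvRowGet r g)).filter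
                (fun z => pvRowGet z g == pvRowGet x g) := by
          rw [List.filter_cons, if_neg (by simp; omega)]
          conv_lhs => rw [← List.takeWhile_append_dropWhile
            (p := fun z => pvRowGet z g == pvRowGet r g) (l := rest)]
          rw [List.filter_append, List.filter_eq_nil_iff.2 ?_, List.nil_append]
          intro z hz
          have hz' := List.mem_takeWhile_imp
            (p := fun z => pvRowGet z g == pvRowGet r g) hz
          simp only [beq_iff_eq] at hz' ⊢
          omega
        simp only [pvFrow]
        rw [hfil]


theorem pv_final (dataset : List (List (String × Int))) (g : String) (ks : List String) (hg : g ∉ ks) :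
    sum_detailed dataset g ks = sum_detailed_alt dataset g ks := by
  have hperm : (PySem.List.sorted dataset (fun item => pvRowGet item g) false).Perm dataset :=
    PySem.List.sorted_perm _ _ _
  have hpair : (PySem.List.sorted dataset (fun item => pvRowGet item g) false).Pairwise
      (fun a b => pvRowGet a g ≤ pvRowGet b g) := PySem.List.sorted_pairwise _ _
  have hFrow : ∀ κ, pvFrow g (PySem.Set.ofList ks)
        (PySem.List.sorted dataset (fun item => pvRowGet item g) false) κ
      = pvFrow g (PySem.Set.ofList ks) dataset κ := by
    intro κ
    simp only [pvFrow]
    congr 1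
    apply List.map_congr_left
    intro k _
    have hpf := (hperm.filter (fun r => pvRowGet r g == κ)).map (fun r => pvRowGet r k)
    rw [hpf.sum_eq]
  have hB : sum_detailed_alt dataset g ks
      = (pvRunKeys g (PySem.List.sorted dataset (fun item => pvRowGet item g) false)).map
          (pvFrow g (PySem.Set.ofList ks) dataset) := by
    unfold sum_detailed_alt
    rw [pv_groupsB_eq g ks hg _ _ le_rfl hpair]
    exact List.map_congr_left (fun κ _ => hFrow κ)
  rw [pv_A_eq dataset g ks hg, hB]
  apply PySem.List.sorted_eq_of_perm_of_pairwise_lt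
  · apply List.Perm.map
    have hnd1 : (pvRunKeys g (PySem.List.sorted dataset (fun item => pvRowGet item g) false)).Nodup := by
      have hpl := pv_runKeys_pairwise g _ _ le_rfl hpair
      exact hpl.imp (fun h => ne_of_lt h)
    have hnd2 : (PySem.Set.ofList (dataset.map (fun r => pvRowGet r g))).Nodup :=
      PySem.Set.nodup_ofList _
    rw [List.perm_ext_iff_of_nodup hnd1 hnd2]
    intro κ
    rw [pv_runKeys_mem g κ _ _ le_rfl, PySem.Set.mem_ofList]
    exact (hperm.map (fun r => pvRowGet r g)).mem_iff
  · have hpl := pv_runKeys_pairwise g _ _ le_rfl hpair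
    rw [List.pairwise_map]
    exact hpl.imp (fun {a b} h => by
      simpa only [pvFrow, pv_rowGet_cons] using h)

-- ===== VERDICT (by name: the statement is the Claim_ definition above) =====
theorem sum_detailed_spec : Claim_equal_sum_detailed := by
  unfold Claim_equal_sum_detailed
  intro dataset g ks _hdom hpre
  unfold Spec_sum_detailed
  exact pv_final dataset g ks hpre.2
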